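-- pv_equiv track=rewrite | github.com/ayoubzulfiqar/Leetcode-Medium | CanYouEatYourFavoriteCandyonYourFavoriteDay/can_you_eat_your_favorite_candy_on_your_favorite_day.py | canEat
-- ===== SOURCE A (Python) =====
-- def canEat(candiesCount: list[int], queries: list[list[int]]) -> list[bool]:
--     n = len(candiesCount)
--
--     # Calculate prefix sums of candiesCount
--     # prefix_sum[i] stores the total number of candies from type 0 to i-1.
--     # prefix_sum[0] = 0
--     # prefix_sum[k] = sum(candiesCount[0]...candiesCount[k-1]) for k > 0.
--     prefix_sum = [0] * (n + 1)
--     for i in range(n):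
--         prefix_sum[i+1] = prefix_sum[i] + candiesCount[i]
--
--     results = []
--     for query in queries:
--         favoriteType, favoriteDay, dailyCap = query
--
--         # Calculate the earliest day we can possibly start eating favoriteType candy.
--         # To eat favoriteType candy, all candies of types 0 to favoriteType - 1 must be eaten.
--         # The total number of such candies is prefix_sum[favoriteType].
--         # Since we can eat at most `dailyCap` candies per day, the minimum number of days
--         # required to consume `prefix_sum[favoriteType]` candies is `prefix_sum[favoriteType] // dailyCap`.
--         # This value represents the day index on which we would start eating `favoriteType`
--         # if we ate `dailyCap` candies every day until `favoriteType` candies become available.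
--         # Example: if 10 candies before, dailyCap 3. 10 // 3 = 3.
--         # Day 0: 3 candies, Day 1: 3 candies, Day 2: 3 candies, Day 3: 1 candy (from previous types) + can start favoriteType.
--         # So, day 3 is the earliest day.
--         earliest_day_to_eat_fav_type = prefix_sum[favoriteType] // dailyCap
--
--         # Calculate the latest day we can still be eating favoriteType candy.
--         # To still be eating favoriteType candy on favoriteDay, we must not have finished
--         # all candies up to and including favoriteType.
--         # The total number of candies up to and including favoriteType is prefix_sum[favoriteType + 1].
--         # Since we must eat at least 1 candy per day, the maximum number of days
--         # we can spend eating these candies is `prefix_sum[favoriteType + 1]` days.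
--         # If we eat 1 candy per day, we would finish on day `(total_candies - 1)`.
--         # Example: if 10 total candies (up to fav type). Eat 1 per day.
--         # Day 0: 1st candy, Day 1: 2nd candy, ..., Day 9: 10th candy. We finish on day 9.
--         # So, we can eat on day 9. We cannot eat on day 10.
--         latest_day_to_eat_fav_type = prefix_sum[favoriteType + 1] - 1
--
--         # Check if favoriteDay falls within the possible range
--         can_eat = (favoriteDay >= earliest_day_to_eat_fav_type) and \
--                   (favoriteDay <= latest_day_to_eat_fav_type)
--
--         results.append(can_eat)
--
--     return results
-- ===== SOURCE B (Python) =====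
-- def canEat(candiesCount: list[int], queries: list[list[int]]) -> list[bool]:
--     p = [sum(candiesCount[:k]) for k in range(len(candiesCount) + 1)]
--     return [p[ft] // dc <= fd < p[ft + 1] for ft, fd, dc in queries]
-- ===== Notes on version B (the rewrite author's own statement) =====
-- stated objective: simpler
-- what changed: Replaces the incremental prefix_sum write loop and the explicit result loop (unpack, named earliest/latest bounds, append) by two comprehensions: the table entry for k is recomputed directly as sum(candiesCount[:k]), and each query is answered with one chained half-open comparison p[ft] // dc <= fd < p[ft+1].
import Mathlib
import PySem

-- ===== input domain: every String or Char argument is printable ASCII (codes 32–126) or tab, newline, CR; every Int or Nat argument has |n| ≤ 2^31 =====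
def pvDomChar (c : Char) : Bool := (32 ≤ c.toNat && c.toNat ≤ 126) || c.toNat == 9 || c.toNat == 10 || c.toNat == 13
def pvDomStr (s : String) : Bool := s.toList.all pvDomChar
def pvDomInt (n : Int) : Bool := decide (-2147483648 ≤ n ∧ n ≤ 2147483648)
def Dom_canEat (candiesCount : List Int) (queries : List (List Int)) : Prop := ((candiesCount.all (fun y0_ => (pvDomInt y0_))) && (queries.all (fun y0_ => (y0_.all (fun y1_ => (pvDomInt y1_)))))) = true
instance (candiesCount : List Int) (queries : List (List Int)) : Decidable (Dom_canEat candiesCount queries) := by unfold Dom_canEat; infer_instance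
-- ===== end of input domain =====

-- B rebuilds the prefix table by direct slice sums in a comprehension and answers each query
-- with one chained half-open comparison, replacing A's incremental write loop and its explicit
-- result loop with named bounds (objective: simpler).

-- ===== PORT A =====
-- the prefix_sum write loop 'prefix_sum[i+1] = prefix_sum[i] + candiesCount[i]' always writes the
-- next free slot, so it is ported as a fold appending one entry per step; its reads at i and i are
-- in range there (0 ≤ i < len), so pyGetD with default 0 is exact on that loop.  The query reads
-- prefix_sum[favoriteType] / prefix_sum[favoriteType + 1] are pyGetD with default 0: exact
-- (Python negative indices included) under Pre_, which keeps both indices in range.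
def canEat (candiesCount : List Int) (queries : List (List Int)) : List Bool :=
  let n := candiesCount.length
  let prefix_sum := (List.range n).foldl
    (fun ps (i : Nat) => ps ++ [PySem.List.pyGetD ps (i : Int) 0 + PySem.List.pyGetD candiesCount (i : Int) 0]) [0]
  queries.foldl (fun results query =>
    match query with
    | [favoriteType, favoriteDay, dailyCap] =>
      let earliest_day_to_eat_fav_type := PySem.Int.floordiv (PySem.List.pyGetD prefix_sum favoriteType 0) dailyCap
      let latest_day_to_eat_fav_type := PySem.List.pyGetD prefix_sum (favoriteType + 1) 0 - 1
      results ++ [decide (favoriteDay ≥ earliest_day_to_eat_fav_type ∧ favoriteDay ≤ latest_day_to_eat_fav_type)]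
    | _ => results ++ [false]  -- unpacking 'favoriteType, favoriteDay, dailyCap = query' raises unless len = 3; excluded by Pre_
    ) []

-- ===== PORT B =====
-- one query of B's comprehension: 'for ft, fd, dc in queries' raises unless len = 3 (excluded by
-- Pre_; other lengths yield a junk false); p[ft] / p[ft + 1] are pyGetD with default 0, exact
-- (negative indices included) under Pre_.  Note Python's chained 'a <= fd < b' short-circuits,
-- which only matters where A raises anyway (outside Pre_).
def altOk (p : List Int) (q : List Int) : Bool :=
  match q with
  | ft :: fd :: dc :: [] =>
    decide (PySem.Int.floordiv (PySem.List.pyGetD p ft 0) dc ≤ fd ∧ fd < PySem.List.pyGetD p (ft + 1) 0)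
  | [] => false
  | [_] => false
  | [_, _] => false
  | _ :: _ :: _ :: _ :: _ => false

def canEat_alt (candiesCount : List Int) (queries : List (List Int)) : List Bool :=
  let p := (PySem.List.pyRange 0 ((candiesCount.length : Int) + 1) 1).map
    (fun k => (PySem.List.slice candiesCount none (some k)).sum)
  queries.map (altOk p)

-- ===== PRECONDITION & SPEC =====
-- Pre_ excludes exactly the inputs on which A raises: a query not of length 3 (unpacking fails),
-- dailyCap = 0 (ZeroDivisionError), and favoriteType outside [-(len+1), len-1] (IndexError on the
-- prefix table of length len+1, read at favoriteType and favoriteType + 1).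
def Pre_canEat (candiesCount : List Int) (queries : List (List Int)) : Prop :=
  ∀ q ∈ queries, q.length = 3 ∧ -((candiesCount.length : Int) + 1) ≤ q.getD 0 0 ∧
    q.getD 0 0 < (candiesCount.length : Int) ∧ q.getD 2 0 ≠ 0
instance (candiesCount : List Int) (queries : List (List Int)) : Decidable (Pre_canEat candiesCount queries) := by unfold Pre_canEat; infer_instance

def pvWitness_canEat : List Int × List (List Int) := ([7, 11, 5], [[0, 2, 2], [1, 5, 1], [-1, 20, 3]])

def Spec_canEat (candiesCount : List Int) (queries : List (List Int)) (out : List Bool) : Prop := out = canEat_alt candiesCount queries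
instance (candiesCount : List Int) (queries : List (List Int)) (out : List Bool) : Decidable (Spec_canEat candiesCount queries out) := by unfold Spec_canEat; infer_instance

-- ===== CLAIM (what is proved, stated in full; the proofs are below) =====
def Claim_equal_canEat : Prop := ∀ (candiesCount : List Int) (queries : List (List Int)), Dom_canEat candiesCount queries → Pre_canEat candiesCount queries → Spec_canEat candiesCount queries (canEat candiesCount queries)

-- ===== LEMMAS AND PROOFS =====

-- A's prefix-sum loop builds exactly the table of take-sums.
lemma prefix_fold_eq (cc : List Int) (m : Nat) (hm : m ≤ cc.length) :
    (List.range m).foldl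
      (fun ps (i : Nat) => ps ++ [PySem.List.pyGetD ps (i : Int) 0 + PySem.List.pyGetD cc (i : Int) 0]) [0]
    = (List.range (m + 1)).map (fun k => ((cc.take k).sum)) := by
  induction m with
  | zero => simp
  | succ m ih =>
    rw [List.range_succ, List.foldl_append, ih (by omega)]
    simp only [List.foldl_cons, List.foldl_nil, PySem.List.pyGetD_natCast]
    rw [List.range_succ (n := m + 1)]
    simp only [List.map_append, List.map_cons, List.map_nil, List.append_cancel_left_eq]
    have hg : (((List.range (m + 1)).map (fun k => ((cc.take k).sum))).getD m 0)
        = (cc.take m).sum := by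
      rw [List.getD_eq_getElem _ _ (by simp)]
      simp
    rw [hg]
    have hc : cc.getD m 0 = cc[m]'(by omega) := List.getD_eq_getElem _ _ (by omega)
    rw [hc, List.take_add_one, List.sum_append]
    simp [List.getElem?_eq_getElem (by omega : m < cc.length)]

-- B's comprehension builds the same table of take-sums.
lemma alt_table_eq (cc : List Int) :
    (PySem.List.pyRange 0 ((cc.length : Int) + 1) 1).map
      (fun k => (PySem.List.slice cc none (some k)).sum)
    = (List.range (cc.length + 1)).map (fun k => ((cc.take k).sum)) := by
  rw [show ((cc.length : Int) + 1) = ((cc.length + 1 : Nat) : Int) by push_cast; ring]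
  rw [PySem.List.pyRange_zero_natCast, List.map_map]
  exact List.map_congr_left (fun k _ => by
    simp only [Function.comp_apply, PySem.List.slice_to_natCast])

theorem canEat_spec : Claim_equal_canEat := by
  intro cc qs _hDom _hPre
  unfold Spec_canEat canEat canEat_alt
  dsimp only
  rw [prefix_fold_eq cc cc.length (le_refl _), alt_table_eq]
  rw [show (fun (results : List Bool) (query : List Int) =>
        match query with
        | [favoriteType, favoriteDay, dailyCap] =>
          results ++
            [decide (favoriteDay ≥ PySem.Int.floordiv
                  (PySem.List.pyGetD ((List.range (cc.length + 1)).map (fun k => ((cc.take k).sum))) favoriteType 0) dailyCap ∧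
                favoriteDay ≤ PySem.List.pyGetD ((List.range (cc.length + 1)).map (fun k => ((cc.take k).sum))) (favoriteType + 1) 0 - 1)]
        | _ => results ++ [false]) =
      (fun results query => results ++
        [altOk ((List.range (cc.length + 1)).map (fun k => ((cc.take k).sum))) query]) from by
      funext results query
      rcases query with _ | ⟨a, _ | ⟨b, _ | ⟨c, _ | d⟩⟩⟩ <;>
        simp only [altOk] <;>
        first
        | rfl
        | (congr 2
           rw [decide_eq_decide]
           exact ⟨fun ⟨ha, hb⟩ => ⟨ha, by omega⟩, fun ⟨ha, hb⟩ => ⟨ha, by omega⟩⟩)]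
  rw [PySem.List.foldl_append_singleton_eq_map, List.nil_append]
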